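-- pv_equiv track=rewrite | github.com/LloydBurris985/Project_Odin | odins_eye.py | bytes_to_symbols
-- ===== SOURCE A (Python) =====
-- def bytes_to_symbols(data_bytes):
--     symbols = []
--     bit_buffer = 0
--     bit_count = 0
--     for b in data_bytes:
--         bit_buffer = (bit_buffer << 8) | b
--         bit_count += 8
--         while bit_count >= 6:
--             symbols.append((bit_buffer >> (bit_count - 6)) & 0x3F)
--             bit_count -= 6
--             bit_buffer &= (1 << bit_count) - 1
--     if bit_count > 0:
--         symbols.append((bit_buffer << (6 - bit_count)) & 0x3F)
--     return symbols
-- ===== SOURCE B (Python) =====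
-- def bytes_to_symbols(data_bytes):
--     symbols = []
--     i = 0
--     n = len(data_bytes)
--     while i + 3 <= n:
--         b1, b2, b3 = data_bytes[i], data_bytes[i + 1], data_bytes[i + 2]
--         symbols += [(b1 >> 2) & 0x3F,
--                     ((b1 << 4) | (b2 >> 4)) & 0x3F,
--                     ((b2 << 2) | (b3 >> 6)) & 0x3F,
--                     b3 & 0x3F]
--         i += 3
--     if n - i == 1:
--         b1 = data_bytes[i]
--         symbols += [(b1 >> 2) & 0x3F, (b1 << 4) & 0x3F]
--     elif n - i == 2:
--         b1, b2 = data_bytes[i], data_bytes[i + 1]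
--         symbols += [(b1 >> 2) & 0x3F,
--                     ((b1 << 4) | (b2 >> 4)) & 0x3F,
--                     (b2 << 2) & 0x3F]
--     return symbols
-- ===== Notes on version B (the rewrite author's own statement) =====
-- stated objective: alternative
-- what changed: Replaced the per-byte draining bit-buffer (inner while loop maintaining bit_buffer/bit_count state) by a stateless 3-byte block encoder that emits the four 6-bit symbols of each block with closed-form shift/mask formulas, plus closed-form 2- and 3-symbol tails for 1 or 2 leftover bytes.
import Mathlib
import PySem

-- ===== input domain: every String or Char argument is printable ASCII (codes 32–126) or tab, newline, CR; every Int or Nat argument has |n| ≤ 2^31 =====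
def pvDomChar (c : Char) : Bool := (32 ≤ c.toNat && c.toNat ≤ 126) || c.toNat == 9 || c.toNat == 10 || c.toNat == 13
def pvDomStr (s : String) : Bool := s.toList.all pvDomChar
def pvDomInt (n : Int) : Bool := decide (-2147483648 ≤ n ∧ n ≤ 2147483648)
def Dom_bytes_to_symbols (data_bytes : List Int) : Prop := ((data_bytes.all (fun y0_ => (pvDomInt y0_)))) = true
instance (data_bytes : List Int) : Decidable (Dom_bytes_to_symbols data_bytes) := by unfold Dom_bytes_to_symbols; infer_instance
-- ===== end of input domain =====

-- B re-implements A as a 3-byte-block encoder with closed-form 6-bit symbol formulas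
-- (objective: alternative decomposition, same output for every input, also out-of-range "bytes").

-- ===== PORT A =====
-- the inner `while bit_count >= 6` loop of A
def drainA (symbols : List Int) (bit_buffer bit_count : Int) : List Int × Int × Int :=
  if h : 6 ≤ bit_count then
    drainA (symbols ++ [PySem.Int.band (bit_buffer >>> (bit_count - 6).toNat) 63])
           (PySem.Int.band bit_buffer ((1 <<< (bit_count - 6).toNat) - 1))
           (bit_count - 6)
  else (symbols, bit_buffer, bit_count)
termination_by bit_count.toNat
decreasing_by omega

-- one iteration of A's `for b in data_bytes` loop
def stepA (st : List Int × Int × Int) (b : Int) : List Int × Int × Int :=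
  drainA st.1 (PySem.Int.bor (st.2.1 <<< (8 : Nat)) b) (st.2.2 + 8)

-- the final `if bit_count > 0` flush
def finishA (st : List Int × Int × Int) : List Int :=
  if 0 < st.2.2 then st.1 ++ [PySem.Int.band (st.2.1 <<< (6 - st.2.2).toNat) 63] else st.1

def bytes_to_symbols (data_bytes : List Int) : List Int :=
  finishA (data_bytes.foldl stepA ([], 0, 0))

-- ===== PORT B =====
-- B walks the input three bytes at a time, emitting each 6-bit symbol by a closed formula
def goB : List Int → List Int
  | b1 :: b2 :: b3 :: rest =>
      PySem.Int.band (b1 >>> (2 : Nat)) 63 ::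
      PySem.Int.band (PySem.Int.bor (b1 <<< (4 : Nat)) (b2 >>> (4 : Nat))) 63 ::
      PySem.Int.band (PySem.Int.bor (b2 <<< (2 : Nat)) (b3 >>> (6 : Nat))) 63 ::
      PySem.Int.band b3 63 :: goB rest
  | [b1, b2] =>
      [PySem.Int.band (b1 >>> (2 : Nat)) 63,
       PySem.Int.band (PySem.Int.bor (b1 <<< (4 : Nat)) (b2 >>> (4 : Nat))) 63,
       PySem.Int.band (b2 <<< (2 : Nat)) 63]
  | [b1] =>
      [PySem.Int.band (b1 >>> (2 : Nat)) 63, PySem.Int.band (b1 <<< (4 : Nat)) 63]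
  | [] => []

def bytes_to_symbols_alt (data_bytes : List Int) : List Int := goB data_bytes

-- ===== PRECONDITION & SPEC =====
def Spec_bytes_to_symbols (data_bytes : List Int) (out : List Int) : Prop := out = bytes_to_symbols_alt data_bytes
instance (data_bytes : List Int) (out : List Int) : Decidable (Spec_bytes_to_symbols data_bytes out) := by unfold Spec_bytes_to_symbols; infer_instance

-- ===== CLAIM (what is proved, stated in full; the proofs are below) =====
def Claim_equal_bytes_to_symbols : Prop := ∀ (data_bytes : List Int), Dom_bytes_to_symbols data_bytes → Spec_bytes_to_symbols data_bytes (bytes_to_symbols data_bytes)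

-- ===== LEMMAS AND PROOFS =====

-- bitwise part of m not in n, plus the common part, gives back m
theorem pv_ldiff_add_land (m n : Nat) : Nat.ldiff m n + (m &&& n) = m := by
  induction m using Nat.binaryRec generalizing n with
  | zero =>
    have h0 : Nat.ldiff 0 n = 0 := by
      apply Nat.eq_of_testBit_eq; intro i; simp [Nat.testBit_ldiff]
    simp [h0]
  | bit a m ih =>
    rw [← n.bit_testBit_zero_shiftRight_one, Nat.ldiff_bit, Nat.land_bit, Nat.bit_val, Nat.bit_val, Nat.bit_val]
    have := ih (n >>> 1)
    cases a <;> cases n.testBit 0 <;> simp <;> omega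

theorem pv_sub_land (m n : Nat) : m - (m &&& n) = Nat.ldiff m n := by
  have := pv_ldiff_add_land m n; omega

theorem pv_negSucc_aux (n : Nat) : (-(Int.negSucc n) - 1) = (n : Int) := by
  rw [Int.negSucc_eq]; ring

theorem pv_toNat_cast (n : Nat) : ((n : Int)).toNat = n := rfl

theorem pv_negSucc_out (k : Nat) : -((k : Nat) : Int) - 1 = Int.negSucc k := by
  rw [Int.negSucc_eq]; ring

-- PySem's Python-exact `&`/`|` are Mathlib's Int.land/Int.lor
theorem pv_band_eq_land (a b : Int) : PySem.Int.band a b = Int.land a b := by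
  have hofNat : ∀ m : Nat, (0:Int) ≤ Int.ofNat m := fun m => Int.natCast_nonneg m
  have hneg : ∀ m : Nat, ¬ (0:Int) ≤ Int.negSucc m := fun m => Int.not_le.mpr (Int.negSucc_lt_zero m)
  cases a with
  | ofNat m =>
    cases b with
    | ofNat n =>
      unfold PySem.Int.band
      rw [if_pos (hofNat m), if_pos (hofNat n)]; rfl
    | negSucc n =>
      unfold PySem.Int.band
      rw [if_pos (hofNat m), if_neg (hneg n), pv_negSucc_aux]
      show ((((Int.ofNat m).toNat - ((Int.ofNat m).toNat &&& ((n:Int)).toNat)) : Nat) : Int) = _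
      rw [show (Int.ofNat m).toNat = m from rfl, pv_toNat_cast, pv_sub_land]; rfl
  | negSucc m =>
    cases b with
    | ofNat n =>
      unfold PySem.Int.band
      rw [if_neg (hneg m), if_pos (hofNat n), pv_negSucc_aux]
      show ((((Int.ofNat n).toNat - ((Int.ofNat n).toNat &&& ((m:Int)).toNat)) : Nat) : Int) = _
      rw [show (Int.ofNat n).toNat = n from rfl, pv_toNat_cast, pv_sub_land]; rfl
    | negSucc n =>
      unfold PySem.Int.band
      rw [if_neg (hneg m), if_neg (hneg n), pv_negSucc_aux, pv_negSucc_aux]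
      rw [pv_toNat_cast, pv_toNat_cast, pv_negSucc_out]; rfl

theorem pv_bor_eq_lor (a b : Int) : PySem.Int.bor a b = Int.lor a b := by
  have hofNat : ∀ m : Nat, (0:Int) ≤ Int.ofNat m := fun m => Int.natCast_nonneg m
  have hneg : ∀ m : Nat, ¬ (0:Int) ≤ Int.negSucc m := fun m => Int.not_le.mpr (Int.negSucc_lt_zero m)
  cases a with
  | ofNat m =>
    cases b with
    | ofNat n =>
      unfold PySem.Int.bor
      rw [if_pos (hofNat m), if_pos (hofNat n)]; rfl
    | negSucc n =>
      unfold PySem.Int.bor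
      rw [if_pos (hofNat m), if_neg (hneg n), pv_negSucc_aux]
      rw [pv_toNat_cast, show (Int.ofNat m).toNat = m from rfl, pv_sub_land, pv_negSucc_out]; rfl
  | negSucc m =>
    cases b with
    | ofNat n =>
      unfold PySem.Int.bor
      rw [if_neg (hneg m), if_pos (hofNat n), pv_negSucc_aux]
      rw [pv_toNat_cast, show (Int.ofNat n).toNat = n from rfl, pv_sub_land, pv_negSucc_out]; rfl
    | negSucc n =>
      unfold PySem.Int.bor
      rw [if_neg (hneg m), if_neg (hneg n), pv_negSucc_aux, pv_negSucc_aux]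
      rw [pv_toNat_cast, pv_toNat_cast, pv_negSucc_out]; rfl

theorem pv_tb_band (a b : Int) (i : Nat) : (PySem.Int.band a b).testBit i = (a.testBit i && b.testBit i) := by
  rw [pv_band_eq_land]; exact Int.testBit_land a b i

theorem pv_tb_bor (a b : Int) (i : Nat) : (PySem.Int.bor a b).testBit i = (a.testBit i || b.testBit i) := by
  rw [pv_bor_eq_lor]; exact Int.testBit_lor a b i

theorem pv_tb_shl (m : Int) (k i : Nat) : (m <<< k).testBit i = (decide (k ≤ i) && m.testBit (i - k)) := by
  cases m with
  | ofNat n =>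
    show (Int.ofNat (n <<< k)).testBit i = _
    simp [Int.testBit, Nat.testBit_shiftLeft]
  | negSucc n =>
    show (Int.negSucc ((n + 1) <<< k - 1)).testBit i = _
    have h1 : (n + 1) <<< k - 1 = 2 ^ k * n + (2 ^ k - 1) := by
      rw [Nat.shiftLeft_eq]
      have : 0 < 2 ^ k := Nat.pow_pos (a := 2) (n := k) (by norm_num)
      ring_nf
      omega
    simp only [Int.testBit, h1]
    rw [Nat.testBit_two_pow_mul_add n (by
      have : 0 < 2 ^ k := Nat.pow_pos (a := 2) (n := k) (by norm_num)
      omega) i]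
    by_cases hik : i < k
    · simp [hik, Nat.testBit_two_pow_sub_one, Nat.not_le.mpr hik]
    · simp [hik, Nat.le_of_not_lt hik]

theorem pv_tb_shr (m : Int) (k i : Nat) : (m >>> k).testBit i = m.testBit (i + k) := by
  cases m with
  | ofNat n =>
    show (Int.ofNat (n >>> k)).testBit i = _
    simp [Int.testBit, Nat.testBit_shiftRight, Nat.add_comm]
  | negSucc n =>
    show (Int.negSucc (n >>> k)).testBit i = _
    simp [Int.testBit, Nat.testBit_shiftRight, Nat.add_comm]

theorem pv_int_ext {a b : Int} (h : ∀ i, a.testBit i = b.testBit i) : a = b := by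
  cases a with
  | ofNat m =>
    cases b with
    | ofNat n =>
      have : m = n := Nat.eq_of_testBit_eq fun i => h i
      simp [this]
    | negSucc n =>
      exfalso
      have hm : m.testBit (m + n) = false := Nat.testBit_lt_two_pow (by
        calc m < 2 ^ m := Nat.lt_two_pow_self
        _ ≤ 2 ^ (m + n) := Nat.pow_le_pow_right (by norm_num) (by omega))
      have hn : n.testBit (m + n) = false := Nat.testBit_lt_two_pow (by
        calc n < 2 ^ n := Nat.lt_two_pow_self
        _ ≤ 2 ^ (m + n) := Nat.pow_le_pow_right (by norm_num) (by omega))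
      have := h (m + n)
      simp [Int.testBit, hm, hn] at this
  | negSucc m =>
    cases b with
    | ofNat n =>
      exfalso
      have hm : m.testBit (m + n) = false := Nat.testBit_lt_two_pow (by
        calc m < 2 ^ m := Nat.lt_two_pow_self
        _ ≤ 2 ^ (m + n) := Nat.pow_le_pow_right (by norm_num) (by omega))
      have hn : n.testBit (m + n) = false := Nat.testBit_lt_two_pow (by
        calc n < 2 ^ n := Nat.lt_two_pow_self
        _ ≤ 2 ^ (m + n) := Nat.pow_le_pow_right (by norm_num) (by omega))
      have := h (m + n)
      simp [Int.testBit, hm, hn] at this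
    | negSucc n =>
      have : m = n := Nat.eq_of_testBit_eq fun i => by
        have := h i; simpa [Int.testBit] using this
      simp [this]

-- testBit of the literal masks 3 = 2^2-1, 15 = 2^4-1, 63 = 2^6-1
theorem pv_tb3 (i : Nat) : (3 : Int).testBit i = decide (i < 2) := by
  show Nat.testBit 3 i = _
  have : (3 : Nat) = 2 ^ 2 - 1 := rfl
  rw [this, Nat.testBit_two_pow_sub_one]
theorem pv_tb15 (i : Nat) : (15 : Int).testBit i = decide (i < 4) := by
  show Nat.testBit 15 i = _
  have : (15 : Nat) = 2 ^ 4 - 1 := rfl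
  rw [this, Nat.testBit_two_pow_sub_one]
theorem pv_tb63 (i : Nat) : (63 : Int).testBit i = decide (i < 6) := by
  show Nat.testBit 63 i = _
  have : (63 : Nat) = 2 ^ 6 - 1 := rfl
  rw [this, Nat.testBit_two_pow_sub_one]

-- the six per-chunk identities between A's drained symbols and B's closed forms
theorem pvE0 (y b : Int) : PySem.Int.band (PySem.Int.bor (y <<< (8 : Nat)) b) 15 = PySem.Int.band b 15 := by
  apply pv_int_ext; intro i
  simp only [pv_tb_band, pv_tb_bor, pv_tb_shl, pv_tb15]
  by_cases hi : i < 4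
  · interval_cases i <;> simp
  · simp [hi]

theorem pvE2 (b1 b2 : Int) :
    PySem.Int.band ((PySem.Int.bor ((PySem.Int.band b1 3) <<< (8 : Nat)) b2) >>> (4 : Nat)) 63
      = PySem.Int.band (PySem.Int.bor (b1 <<< (4 : Nat)) (b2 >>> (4 : Nat))) 63 := by
  apply pv_int_ext; intro i
  simp only [pv_tb_band, pv_tb_bor, pv_tb_shl, pv_tb_shr, pv_tb3, pv_tb63]
  by_cases hi : i < 6
  · interval_cases i <;> simp
  · simp [hi]

theorem pvE3 (b2 b3 : Int) :
    PySem.Int.band ((PySem.Int.bor ((PySem.Int.band b2 15) <<< (8 : Nat)) b3) >>> (6 : Nat)) 63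
      = PySem.Int.band (PySem.Int.bor (b2 <<< (2 : Nat)) (b3 >>> (6 : Nat))) 63 := by
  apply pv_int_ext; intro i
  simp only [pv_tb_band, pv_tb_bor, pv_tb_shl, pv_tb_shr, pv_tb15, pv_tb63]
  by_cases hi : i < 6
  · interval_cases i <;> simp
  · simp [hi]

theorem pvE4 (b2 b3 : Int) :
    PySem.Int.band (PySem.Int.band (PySem.Int.bor ((PySem.Int.band b2 15) <<< (8 : Nat)) b3) 63) 63
      = PySem.Int.band b3 63 := by
  apply pv_int_ext; intro i
  simp only [pv_tb_band, pv_tb_bor, pv_tb_shl, pv_tb15, pv_tb63]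
  by_cases hi : i < 6
  · interval_cases i <;> simp
  · simp [hi]

theorem pvE5 (b1 : Int) :
    PySem.Int.band ((PySem.Int.band b1 3) <<< (4 : Nat)) 63 = PySem.Int.band (b1 <<< (4 : Nat)) 63 := by
  apply pv_int_ext; intro i
  simp only [pv_tb_band, pv_tb_shl, pv_tb3, pv_tb63]
  by_cases hi : i < 6
  · interval_cases i <;> simp
  · simp [hi]

theorem pvE6 (b2 : Int) :
    PySem.Int.band ((PySem.Int.band b2 15) <<< (2 : Nat)) 63 = PySem.Int.band (b2 <<< (2 : Nat)) 63 := by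
  apply pv_int_ext; intro i
  simp only [pv_tb_band, pv_tb_shl, pv_tb15, pv_tb63]
  by_cases hi : i < 6
  · interval_cases i <;> simp
  · simp [hi]

-- small closed-term evaluations used when unfolding the drain loop
theorem pv_toNat_two : ((2 : Int)).toNat = 2 := rfl
theorem pv_toNat_four : ((4 : Int)).toNat = 4 := rfl
theorem pv_toNat_six : ((6 : Int)).toNat = 6 := rfl
theorem pv_mask2 : ((1 : Int) <<< (2 : Nat)) - 1 = 3 := by decide
theorem pv_mask4 : ((1 : Int) <<< (4 : Nat)) - 1 = 15 := by decide
theorem pv_mask6 : ((1 : Int) <<< (6 : Nat)) - 1 = 63 := by decide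
theorem pv_bor_zero_left (b : Int) : PySem.Int.bor 0 b = b := by
  apply pv_int_ext; intro i
  rw [pv_tb_bor]
  cases b <;> simp [Int.testBit]

-- evaluations of the drain loop at the concrete bit counts A reaches
theorem pv_drain_lt (s : List Int) (buf c : Int) (h : c < 6) : drainA s buf c = (s, buf, c) := by
  rw [drainA]; rw [dif_neg (by omega)]

theorem pv_drain8 (s : List Int) (buf : Int) :
    drainA s buf 8 = (s ++ [PySem.Int.band (buf >>> (2 : Nat)) 63], PySem.Int.band buf 3, 2) := by
  rw [drainA]; rw [dif_pos (by norm_num)]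
  norm_num [pv_drain_lt, pv_toNat_two, pv_toNat_four, pv_toNat_six, pv_mask2, pv_mask4, pv_mask6]

theorem pv_drain10 (s : List Int) (buf : Int) :
    drainA s buf 10 = (s ++ [PySem.Int.band (buf >>> (4 : Nat)) 63], PySem.Int.band buf 15, 4) := by
  rw [drainA]; rw [dif_pos (by norm_num)]
  norm_num [pv_drain_lt, pv_toNat_two, pv_toNat_four, pv_toNat_six, pv_mask2, pv_mask4, pv_mask6]

theorem pv_drain12 (s : List Int) (buf : Int) :
    drainA s buf 12 = (s ++ [PySem.Int.band (buf >>> (6 : Nat)) 63,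
      PySem.Int.band (PySem.Int.band buf 63) 63], 0, 0) := by
  rw [drainA]; rw [dif_pos (by norm_num)]
  rw [drainA]; rw [dif_pos (by norm_num)]
  norm_num [pv_drain_lt, pv_toNat_two, pv_toNat_four, pv_toNat_six, pv_mask2, pv_mask4, pv_mask6]

theorem pv_step1 (s : List Int) (b1 : Int) :
    stepA (s, 0, 0) b1 = (s ++ [PySem.Int.band (b1 >>> (2 : Nat)) 63], PySem.Int.band b1 3, 2) := by
  simp only [stepA]
  rw [show ((0 : Int) <<< (8 : Nat)) = 0 from rfl, pv_bor_zero_left]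
  norm_num [pv_drain8, pv_toNat_two]

theorem pv_step2 (s : List Int) (b1 b2 : Int) :
    stepA (s, PySem.Int.band b1 3, 2) b2
      = (s ++ [PySem.Int.band (PySem.Int.bor (b1 <<< (4 : Nat)) (b2 >>> (4 : Nat))) 63],
         PySem.Int.band b2 15, 4) := by
  simp only [stepA]
  norm_num [pv_drain10, pvE2, pvE0, pv_toNat_four]

theorem pv_step3 (s : List Int) (b2 b3 : Int) :
    stepA (s, PySem.Int.band b2 15, 4) b3
      = (s ++ [PySem.Int.band (PySem.Int.bor (b2 <<< (2 : Nat)) (b3 >>> (6 : Nat))) 63,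
               PySem.Int.band b3 63], 0, 0) := by
  simp only [stepA]
  norm_num [pv_drain12, pvE3, pvE4, pv_toNat_six]

-- the main loop invariant: flushing A's fold from a clean state yields B's chunked output
theorem pv_main : ∀ (l syms : List Int), finishA (l.foldl stepA (syms, 0, 0)) = syms ++ goB l
  | [], syms => by simp [finishA, goB]
  | [b1], syms => by
    simp only [List.foldl, pv_step1, goB, finishA]
    norm_num [pvE5, pv_toNat_four]
  | [b1, b2], syms => by
    simp only [List.foldl, pv_step1, pv_step2, goB, finishA]
    norm_num [pvE6, pv_toNat_two]
  | b1 :: b2 :: b3 :: rest, syms => by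
    simp only [List.foldl, pv_step1, pv_step2, pv_step3]
    rw [pv_main rest]
    simp [goB]

-- ===== VERDICT (by name: the statement is the Claim_ definition above) =====
theorem bytes_to_symbols_spec : Claim_equal_bytes_to_symbols := by
  intro data_bytes _
  unfold Spec_bytes_to_symbols bytes_to_symbols bytes_to_symbols_alt
  simpa using pv_main data_bytes []
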